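-- pv_equiv track=rewrite | github.com/longiy/Textureaide | textureaide_enhanced/utils/udim_utils.py | generate_udim_sequence
-- ===== SOURCE A (Python) =====
-- from typing import Dict, List, Tuple, Optional, Set
--
-- def parse_udim_number(udim: int) -> Tuple[int, int]:
--     """
--     Parse UDIM number into U and V tile coordinates
--
--     Args:
--         udim: UDIM number (e.g., 1001, 1002, 1011)
--
--     Returns:
--         Tuple of (U, V) coordinates
--
--     Example:
--         1001 -> (0, 0)
--         1002 -> (1, 0)
--         1011 -> (0, 1)
--     """
--     if udim < 1001:
--         raise ValueError(f"Invalid UDIM number: {udim}. Must be >= 1001")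
--
--     # UDIM formula: 1001 + U + (V * 10)
--     # So: udim - 1001 = U + (V * 10)
--     offset = udim - 1001
--     u = offset % 10
--     v = offset // 10
--
--     return (u, v)
--
-- def create_udim_number(u: int, v: int) -> int:
--     """
--     Create UDIM number from U and V tile coordinates
--
--     Args:
--         u: U coordinate (0-9)
--         v: V coordinate (0+)
--
--     Returns:
--         UDIM number
--
--     Example:
--         (0, 0) -> 1001
--         (1, 0) -> 1002
--         (0, 1) -> 1011
--     """
--     if u < 0 or u > 9:
--         raise ValueError(f"U coordinate must be 0-9, got {u}")
--     if v < 0: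
--         raise ValueError(f"V coordinate must be >= 0, got {v}")
--
--     return 1001 + u + (v * 10)
--
-- def generate_udim_sequence(start_udim: int = 1001, count: int = 10) -> List[int]:
--     """
--     Generate a sequence of UDIM numbers
--
--     Args:
--         start_udim: Starting UDIM number
--         count: Number of UDIMs to generate
--
--     Returns:
--         List of UDIM numbers
--     """
--     udims = []
--     u, v = parse_udim_number(start_udim)
--
--     for i in range(count):
--         current_u = (u + i) % 10
--         current_v = v + ((u + i) // 10)
--         udims.append(create_udim_number(current_u, current_v))
--
--     return udims
-- ===== SOURCE B (Python) =====
-- def generate_udim_sequence(start_udim: int = 1001, count: int = 10):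
--     if start_udim < 1001:
--         raise ValueError(f"Invalid UDIM number: {start_udim}. Must be >= 1001")
--     return list(range(start_udim, start_udim + count))
-- ===== Notes on version B (the rewrite author's own statement) =====
-- stated objective: simpler
-- what changed: B replaces the (u,v) tile parse, per-step modular wrap and tile re-encoding with one validity guard and a direct list(range(start_udim, start_udim + count)), since consecutive UDIM numbers are just consecutive integers.
import Mathlib
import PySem

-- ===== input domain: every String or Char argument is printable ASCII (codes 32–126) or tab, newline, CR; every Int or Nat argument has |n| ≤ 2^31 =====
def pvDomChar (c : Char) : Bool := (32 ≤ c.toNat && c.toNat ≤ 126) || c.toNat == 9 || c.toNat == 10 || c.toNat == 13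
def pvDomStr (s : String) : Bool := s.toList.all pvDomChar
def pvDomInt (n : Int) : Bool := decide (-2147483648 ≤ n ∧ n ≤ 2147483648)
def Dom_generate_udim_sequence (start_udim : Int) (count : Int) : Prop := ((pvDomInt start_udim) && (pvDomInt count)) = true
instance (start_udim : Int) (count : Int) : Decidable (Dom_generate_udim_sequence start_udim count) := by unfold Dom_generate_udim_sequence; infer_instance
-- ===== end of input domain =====

-- B drops A's (u,v) tile parse / modular-wrap machinery for a direct range; objective: simpler.

-- ===== PORT A =====
-- parse_udim_number: raises ValueError for udim < 1001 (excluded by Pre_; junk (0,0) there)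
def parse_udim_number (udim : Int) : Int × Int :=
  if udim < 1001 then (0, 0)
  else (PySem.Int.mod (udim - 1001) 10, PySem.Int.floordiv (udim - 1001) 10)

-- create_udim_number: raises ValueError when u ∉ [0,9] or v < 0 (never reached under Pre_; junk 0 there)
def create_udim_number (u : Int) (v : Int) : Int :=
  if u < 0 ∨ 9 < u then 0
  else if v < 0 then 0
  else 1001 + u + v * 10

def generate_udim_sequence (start_udim : Int) (count : Int) : List Int :=
  let uv := parse_udim_number start_udim
  let u := uv.1
  let v := uv.2
  (PySem.List.pyRange 0 count 1).foldl
    (fun udims i =>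
      udims ++ [create_udim_number (PySem.Int.mod (u + i) 10)
                                   (v + PySem.Int.floordiv (u + i) 10)])
    []

-- ===== PORT B =====
def generate_udim_sequence_alt (start_udim : Int) (count : Int) : List Int :=
  if start_udim < 1001 then []   -- B raises ValueError here (outside Pre_)
  else PySem.List.pyRange start_udim (start_udim + count) 1

-- ===== PRECONDITION & SPEC =====
-- A (via parse_udim_number) raises ValueError for start_udim < 1001; B raises the same error there.
def Pre_generate_udim_sequence (start_udim : Int) (count : Int) : Prop := 1001 ≤ start_udim
instance (start_udim : Int) (count : Int) : Decidable (Pre_generate_udim_sequence start_udim count) := by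
  unfold Pre_generate_udim_sequence; infer_instance
def pvWitness_generate_udim_sequence : Int × Int := (1005, 7)

def Spec_generate_udim_sequence (start_udim : Int) (count : Int) (out : List Int) : Prop := out = generate_udim_sequence_alt start_udim count
instance (start_udim : Int) (count : Int) (out : List Int) : Decidable (Spec_generate_udim_sequence start_udim count out) := by unfold Spec_generate_udim_sequence; infer_instance

-- ===== CLAIM (what is proved, stated in full; the proofs are below) =====
def Claim_equal_generate_udim_sequence : Prop := ∀ (start_udim : Int) (count : Int), Dom_generate_udim_sequence start_udim count → Pre_generate_udim_sequence start_udim count → Spec_generate_udim_sequence start_udim count (generate_udim_sequence start_udim count)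

-- ===== LEMMAS AND PROOFS =====

-- Each loop step of A produces exactly start_udim + i.
theorem pv_step (s i : Int) (hs : 1001 ≤ s) (hi : 0 ≤ i) :
    create_udim_number (PySem.Int.mod ((parse_udim_number s).1 + i) 10)
        ((parse_udim_number s).2 + PySem.Int.floordiv ((parse_udim_number s).1 + i) 10)
      = s + i := by
  have h10 : (0:Int) < 10 := by norm_num
  unfold parse_udim_number
  rw [if_neg (by omega)]
  simp only
  simp only [PySem.Int.mod_eq_emod_of_pos h10, PySem.Int.floordiv_eq_ediv_of_pos h10]
  unfold create_udim_number
  have hm := Int.emod_nonneg ((s - 1001) % 10 + i) (by norm_num : (10:Int) ≠ 0)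
  have hm2 := Int.emod_lt_of_pos ((s - 1001) % 10 + i) h10
  rw [if_neg (by omega)]
  have hm3 := Int.emod_nonneg (s - 1001) (by norm_num : (10:Int) ≠ 0)
  have hd1 := Int.ediv_add_emod (s - 1001) 10
  have hd2 := Int.ediv_add_emod ((s - 1001) % 10 + i) 10
  rw [if_neg (by omega)]
  omega

theorem generate_eq (s c : Int) (hs : 1001 ≤ s) :
    generate_udim_sequence s c = PySem.List.pyRange s (s + c) 1 := by
  unfold generate_udim_sequence
  rw [PySem.List.foldl_append_singleton_eq_map]
  rw [PySem.List.pyRange_one 0 c, PySem.List.pyRange_one s (s + c)]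
  simp only [sub_zero, add_sub_cancel_left, List.map_map]
  refine List.map_congr_left (fun k _ => ?_)
  simpa using pv_step s (k : Int) hs (by positivity)

-- ===== VERDICT (by name: the statement is the Claim_ definition above) =====
theorem generate_udim_sequence_spec : Claim_equal_generate_udim_sequence := by
  intro s c _ hpre
  unfold Spec_generate_udim_sequence generate_udim_sequence_alt
  rw [if_neg (by exact not_lt.mpr hpre)]
  exact generate_eq s c hpre
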